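-- pv_equiv track=rewrite | github.com/depictio/depictio | depictio/api/v1/endpoints/events_endpoints/routes.py | _pick_id_column
-- ===== SOURCE A (Python) =====
-- def _pick_id_column(columns: list[str]) -> str | None:
--     """Pick a likely-unique column to anchor the new-ids diff.
--
--     Preference order: ``index_index`` (common Depictio convention), columns
--     ending in ``_id`` / ``id`` / ``index``, then the first column. Returns
--     None for an empty schema.
--     """
--     if not columns:
--         return None
--     for cand in ("index_index", "id", "ID", "Id"):
--         if cand in columns:
--             return cand
--     for col in columns:
--         lower = col.lower()
--         if lower.endswith("_id") or lower.endswith("_index") or lower == "index":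
--             return col
--     return columns[0]
-- ===== SOURCE B (Python) =====
-- def _pick_id_column(columns: list[str]) -> str | None:
--     """One scored pass: rank each column with a priority key and take the min."""
--     if not columns:
--         return None
--     exact = ("index_index", "id", "ID", "Id")
--
--     def key(item):
--         i, col = item
--         if col in exact:
--             return (0, exact.index(col))
--         lower = col.lower()
--         if lower.endswith("_id") or lower.endswith("_index") or lower == "index":
--             return (1, i)
--         return (2, i)
--
--     return min(enumerate(columns), key=key)[1]
-- ===== Notes on version B (the rewrite author's own statement) =====
-- stated objective: alternative
-- what changed: Replaces A's two sequential scans (exact-candidate scan over the tuple, then a suffix scan over the columns) with a single scored pass: each enumerated column gets a lexicographic priority key (exact-tuple rank, then suffix-match position, then position) and the minimum-key column is selected.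
import Mathlib
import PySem

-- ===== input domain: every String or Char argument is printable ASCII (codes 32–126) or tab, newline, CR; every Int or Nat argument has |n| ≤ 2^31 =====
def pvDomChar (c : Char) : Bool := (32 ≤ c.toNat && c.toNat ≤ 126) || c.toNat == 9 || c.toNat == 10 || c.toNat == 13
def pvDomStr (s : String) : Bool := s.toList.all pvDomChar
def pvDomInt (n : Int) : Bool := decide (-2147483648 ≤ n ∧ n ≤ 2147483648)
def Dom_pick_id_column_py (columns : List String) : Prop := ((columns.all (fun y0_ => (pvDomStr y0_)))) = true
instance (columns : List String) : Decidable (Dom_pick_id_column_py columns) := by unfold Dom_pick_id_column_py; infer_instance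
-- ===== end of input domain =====

-- B replaces A's two sequential scans by one scored pass (a priority key per column, selected with min); objective: alternative decomposition, same cost.

-- ===== PORT A =====
-- for cand in ("index_index","id","ID","Id"): if cand in columns: return cand
def pickCandLoop : List String → List String → Option String
  | [], _ => none
  | c :: cs, columns => if columns.contains c then some c else pickCandLoop cs columns

-- for col in columns: lower = col.lower(); if lower.endswith(...) ...: return col
def pickColLoop : List String → Option String
  | [] => none
  | col :: rest =>
    let lower := PySem.Str.lower col
    if PySem.Str.endswith lower "_id" || PySem.Str.endswith lower "_index" || lower == "index"
    then some col else pickColLoop rest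

def pick_id_column_py (columns : List String) : Option String :=
  if columns.isEmpty then none
  else
    match pickCandLoop ["index_index", "id", "ID", "Id"] columns with
    | some c => some c
    | none =>
      match pickColLoop columns with
      | some c => some c
      | none => PySem.List.pyGet? columns 0

-- ===== PORT B =====
def altExact : List String := ["index_index", "id", "ID", "Id"]

-- the key(i, col) function of Source B
def altKey (i : Int) (col : String) : Nat × Int :=
  match PySem.List.index? altExact col with
  | some t => (0, (t : Int))
  | none =>
    let lower := PySem.Str.lower col
    if PySem.Str.endswith lower "_id" || PySem.Str.endswith lower "_index" || lower == "index"
    then (1, i) else (2, i)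

-- lexicographic strict < on keys, as Python compares tuples
def keyLt (a b : Nat × Int) : Bool := a.1 < b.1 || (a.1 == b.1 && a.2 < b.2)

-- one min step: keep the accumulator unless the new item's key is strictly smaller (Python's min keeps the first minimum)
def minStep (acc p : Int × String) : Int × String :=
  if keyLt (altKey p.1 p.2) (altKey acc.1 acc.2) then p else acc

def pick_id_column_py_alt (columns : List String) : Option String :=
  match PySem.List.enumerate columns with
  | [] => none
  | p :: ps => some ((ps.foldl minStep p).2)

-- ===== PRECONDITION & SPEC =====
def Spec_pick_id_column_py (columns : List String) (out : Option String) : Prop := out = pick_id_column_py_alt columns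
instance (columns : List String) (out : Option String) : Decidable (Spec_pick_id_column_py columns out) := by unfold Spec_pick_id_column_py; infer_instance

-- ===== CLAIM (what is proved, stated in full; the proofs are below) =====
def Claim_equal_pick_id_column_py : Prop := ∀ (columns : List String), Dom_pick_id_column_py columns → Spec_pick_id_column_py columns (pick_id_column_py columns)

-- ===== LEMMAS AND PROOFS =====

-- the suffix condition both programs test
def suffCond (col : String) : Bool :=
  PySem.Str.endswith (PySem.Str.lower col) "_id" || PySem.Str.endswith (PySem.Str.lower col) "_index" ||
    (PySem.Str.lower col == "index")

theorem index?_altExact (x : String) :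
    PySem.List.index? altExact x =
      (if "index_index" = x then some 0 else if "id" = x then some 1 else
        if "ID" = x then some 2 else if "Id" = x then some 3 else none) := by
  simp only [altExact, PySem.List.index?_eq_idxOf?, List.idxOf?_cons, List.idxOf?_nil]
  split_ifs <;> simp_all

theorem altKey_eq (i : Int) (x : String) :
    altKey i x =
      (if "index_index" = x then ((0 : Nat), (0 : Int)) else if "id" = x then (0, 1) else
        if "ID" = x then (0, 2) else if "Id" = x then (0, 3) else
        if suffCond x then (1, i) else (2, i)) := by
  unfold altKey suffCond
  rw [index?_altExact]
  split_ifs <;> simp_all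

theorem keyLt_irrefl (a : Nat × Int) : keyLt a a = false := by
  simp [keyLt]

theorem keyLt_antisymm {a b : Nat × Int} (h1 : keyLt a b = false) (h2 : keyLt b a = false) : a = b := by
  rcases a with ⟨a1, a2⟩; rcases b with ⟨b1, b2⟩
  simp [keyLt] at h1 h2
  have h3 : a1 = b1 ∧ a2 = b2 := by omega
  simp [h3.1, h3.2]

theorem keyLt_asymm {a b : Nat × Int} (h : keyLt a b = true) : keyLt b a = false := by
  rcases a with ⟨a1, a2⟩; rcases b with ⟨b1, b2⟩
  simp [keyLt] at h ⊢
  omega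

theorem keyGe_trans {a b c : Nat × Int} (h1 : keyLt a b = false) (h2 : keyLt b c = false) :
    keyLt a c = false := by
  rcases a with ⟨a1, a2⟩; rcases b with ⟨b1, b2⟩; rcases c with ⟨c1, c2⟩
  simp [keyLt] at h1 h2 ⊢
  omega

theorem foldl_minStep_mem (ps : List (Int × String)) (p : Int × String) :
    ps.foldl minStep p ∈ p :: ps := by
  induction ps generalizing p with
  | nil => simp
  | cons q qs ih =>
    simp only [List.foldl_cons]
    have h := ih (minStep p q)
    have hm : minStep p q = p ∨ minStep p q = q := by unfold minStep; split <;> simp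
    rw [List.mem_cons] at h
    rcases h with h | h
    · rcases hm with hm | hm <;> rw [h, hm] <;> simp
    · simp [h]

theorem foldl_minStep_min (ps : List (Int × String)) (p : Int × String) :
    ∀ q ∈ p :: ps, keyLt (altKey q.1 q.2) (altKey (ps.foldl minStep p).1 (ps.foldl minStep p).2) = false := by
  induction ps generalizing p with
  | nil => intro q hq; simp at hq; subst hq; exact keyLt_irrefl _
  | cons q' qs ih =>
    intro q hq
    simp only [List.foldl_cons]
    have hstep_p : keyLt (altKey p.1 p.2) (altKey (minStep p q').1 (minStep p q').2) = false := by
      unfold minStep; split_ifs with h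
      · exact keyLt_asymm h
      · exact keyLt_irrefl _
    have hstep_q' : keyLt (altKey q'.1 q'.2) (altKey (minStep p q').1 (minStep p q').2) = false := by
      unfold minStep; split_ifs with h
      · exact keyLt_irrefl _
      · simpa using h
    have hmin := ih (minStep p q')
    rw [List.mem_cons, List.mem_cons] at hq
    rcases hq with hq | hq | hq
    · subst hq; exact keyGe_trans hstep_p (hmin _ (by simp))
    · subst hq; exact keyGe_trans hstep_q' (hmin _ (by simp))
    · exact hmin q (by simp [hq])

theorem mem_enum_shape {columns : List String} {q : Int × String}
    (hq : q ∈ PySem.List.enumerate columns) :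
    ∃ (k : Nat) (h : k < columns.length), q = ((k : Int), columns[k]) := by
  rw [PySem.List.mem_enumerate_iff] at hq
  obtain ⟨k, h, hq⟩ := hq
  exact ⟨k, h, by simpa using hq⟩

theorem key_inj {columns : List String} {q r : Int × String}
    (hq : q ∈ PySem.List.enumerate columns) (hr : r ∈ PySem.List.enumerate columns)
    (hk : altKey q.1 q.2 = altKey r.1 r.2) : q.2 = r.2 := by
  obtain ⟨k, hkl, rfl⟩ := mem_enum_shape hq
  obtain ⟨k', hkl', rfl⟩ := mem_enum_shape hr
  rw [altKey_eq, altKey_eq] at hk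
  split_ifs at hk <;> simp_all

-- the fold returns the unique element whose key equals the minimum K
theorem fold_eq_of_min {columns : List String} {p : Int × String} {ps : List (Int × String)}
    (henum : PySem.List.enumerate columns = p :: ps)
    (K : Nat × Int) (i : Int) (a : String)
    (hmem : (i, a) ∈ p :: ps) (hkey : altKey i a = K)
    (hlb : ∀ q ∈ p :: ps, keyLt (altKey q.1 q.2) K = false) :
    (ps.foldl minStep p).2 = a := by
  set r := ps.foldl minStep p with hr
  have hrmem : r ∈ p :: ps := foldl_minStep_mem ps p
  have h1 : keyLt (altKey r.1 r.2) K = false := hlb r hrmem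
  have h2 : keyLt K (altKey r.1 r.2) = false := by
    have := foldl_minStep_min ps p (i, a) hmem
    rw [hkey] at this; exact this
  have heq : altKey r.1 r.2 = K := keyLt_antisymm h1 h2
  have : altKey r.1 r.2 = altKey (i, a).1 (i, a).2 := by rw [heq, ← hkey]
  have := key_inj (columns := columns) (by rw [henum]; exact hrmem) (by rw [henum]; exact hmem) this
  exact this.symm ▸ rfl

theorem colLoop_some {l : List String} {a : String} (h : pickColLoop l = some a) :
    ∃ pre suf, l = pre ++ a :: suf ∧ suffCond a = true ∧ ∀ x ∈ pre, suffCond x = false := by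
  induction l with
  | nil => simp [pickColLoop] at h
  | cons col rest ih =>
    have h' : (if suffCond col = true then some col else pickColLoop rest) = some a := h
    by_cases hc : suffCond col
    · rw [if_pos hc] at h'
      obtain rfl : col = a := by injection h'
      exact ⟨[], rest, rfl, hc, by simp⟩
    · rw [if_neg hc] at h'
      obtain ⟨pre, suf, h1, h2, h3⟩ := ih h'
      refine ⟨col :: pre, suf, by simp [h1], h2, ?_⟩
      intro x hx
      rw [List.mem_cons] at hx
      rcases hx with rfl | hx
      · simpa using hc
      · exact h3 x hx

theorem colLoop_none {l : List String} (h : pickColLoop l = none) :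
    ∀ x ∈ l, suffCond x = false := by
  induction l with
  | nil => simp
  | cons col rest ih =>
    have h' : (if suffCond col = true then some col else pickColLoop rest) = none := h
    by_cases hc : suffCond col
    · rw [if_pos hc] at h'; simp at h'
    · rw [if_neg hc] at h'
      intro x hx
      rw [List.mem_cons] at hx
      rcases hx with rfl | hx
      · simpa using hc
      · exact ih h' x hx


theorem mem_enum_of_getElem {columns : List String} {k : Nat} (hk : k < columns.length) :
    ((k : Int), columns[k]) ∈ PySem.List.enumerate columns := by
  rw [PySem.List.mem_enumerate_iff]; exact ⟨k, hk, by simp⟩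

theorem alt_eq_of_min {columns : List String} (hne : columns ≠ []) (K : Nat × Int) (i : Int) (a : String)
    (hmem : (i, a) ∈ PySem.List.enumerate columns) (hkey : altKey i a = K)
    (hlb : ∀ q ∈ PySem.List.enumerate columns, keyLt (altKey q.1 q.2) K = false) :
    pick_id_column_py_alt columns = some a := by
  cases columns with
  | nil => simp at hne
  | cons c cs =>
    have henum : PySem.List.enumerate (c :: cs) = (0, c) :: PySem.List.enumerate cs 1 := by
      rw [PySem.List.enumerate_cons]; norm_num
    have hred : pick_id_column_py_alt (c :: cs) =
        some ((PySem.List.enumerate cs 1).foldl minStep (0, c)).2 := by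
      unfold pick_id_column_py_alt
      rw [henum]
    have := fold_eq_of_min henum K i a (by rw [← henum]; exact hmem) hkey
      (by rw [← henum]; exact hlb)
    rw [hred, this]

theorem main_eq (columns : List String) : pick_id_column_py columns = pick_id_column_py_alt columns := by
  cases columns with
  | nil => rfl
  | cons c cs =>
    have hne : (c :: cs) ≠ [] := by simp
    by_cases h0 : (c :: cs).contains "index_index"
    · have hm : "index_index" ∈ c :: cs := by simpa using h0
      have hm' : "index_index" = c ∨ "index_index" ∈ cs := by simpa using hm
      obtain ⟨k, hk, hg⟩ := List.mem_iff_getElem.mp hm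
      have halt : pick_id_column_py_alt (c :: cs) = some "index_index" := by
        refine alt_eq_of_min hne (0, 0) (k : Int) _ (hg ▸ mem_enum_of_getElem hk) (by simp [altKey_eq]) ?_
        intro q hq
        obtain ⟨j, hj, rfl⟩ := mem_enum_shape hq
        rw [altKey_eq]; split_ifs <;> simp [keyLt]
      rw [halt]
      simp [pick_id_column_py, pickCandLoop, hm']
    · have hnm0 : "index_index" ∉ c :: cs := by simpa using h0
      have hn0 : ¬("index_index" = c ∨ "index_index" ∈ cs) := by simpa using hnm0
      by_cases h1 : (c :: cs).contains "id"
      · have hm : "id" ∈ c :: cs := by simpa using h1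
        have hm' : "id" = c ∨ "id" ∈ cs := by simpa using hm
        obtain ⟨k, hk, hg⟩ := List.mem_iff_getElem.mp hm
        have halt : pick_id_column_py_alt (c :: cs) = some "id" := by
          refine alt_eq_of_min hne (0, 1) (k : Int) _ (hg ▸ mem_enum_of_getElem hk) (by simp [altKey_eq]) ?_
          intro q hq
          obtain ⟨j, hj, rfl⟩ := mem_enum_shape hq
          rw [altKey_eq]
          split_ifs with e0 <;> try simp [keyLt]
          exact absurd (e0 ▸ List.getElem_mem hj) hnm0
        rw [halt]
        simp [pick_id_column_py, pickCandLoop, hn0, hm']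
      · have hnm1 : "id" ∉ c :: cs := by simpa using h1
        have hn1 : ¬("id" = c ∨ "id" ∈ cs) := by simpa using hnm1
        by_cases h2 : (c :: cs).contains "ID"
        · have hm : "ID" ∈ c :: cs := by simpa using h2
          have hm' : "ID" = c ∨ "ID" ∈ cs := by simpa using hm
          obtain ⟨k, hk, hg⟩ := List.mem_iff_getElem.mp hm
          have halt : pick_id_column_py_alt (c :: cs) = some "ID" := by
            refine alt_eq_of_min hne (0, 2) (k : Int) _ (hg ▸ mem_enum_of_getElem hk) (by simp [altKey_eq]) ?_
            intro q hq
            obtain ⟨j, hj, rfl⟩ := mem_enum_shape hq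
            rw [altKey_eq]
            split_ifs with e0 e1 <;> try simp [keyLt]
            · exact absurd (e0 ▸ List.getElem_mem hj) hnm0
            · exact absurd (e1 ▸ List.getElem_mem hj) hnm1
          rw [halt]
          simp [pick_id_column_py, pickCandLoop, hn0, hn1, hm']
        · have hnm2 : "ID" ∉ c :: cs := by simpa using h2
          have hn2 : ¬("ID" = c ∨ "ID" ∈ cs) := by simpa using hnm2
          by_cases h3 : (c :: cs).contains "Id"
          · have hm : "Id" ∈ c :: cs := by simpa using h3
            have hm' : "Id" = c ∨ "Id" ∈ cs := by simpa using hm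
            obtain ⟨k, hk, hg⟩ := List.mem_iff_getElem.mp hm
            have halt : pick_id_column_py_alt (c :: cs) = some "Id" := by
              refine alt_eq_of_min hne (0, 3) (k : Int) _ (hg ▸ mem_enum_of_getElem hk) (by simp [altKey_eq]) ?_
              intro q hq
              obtain ⟨j, hj, rfl⟩ := mem_enum_shape hq
              rw [altKey_eq]
              split_ifs with e0 e1 e2 <;> try simp [keyLt]
              · exact absurd (e0 ▸ List.getElem_mem hj) hnm0
              · exact absurd (e1 ▸ List.getElem_mem hj) hnm1
              · exact absurd (e2 ▸ List.getElem_mem hj) hnm2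
            rw [halt]
            simp [pick_id_column_py, pickCandLoop, hn0, hn1, hn2, hm']
          · have hnm3 : "Id" ∉ c :: cs := by simpa using h3
            have hn3 : ¬("Id" = c ∨ "Id" ∈ cs) := by simpa using hnm3
            cases hcol : pickColLoop (c :: cs) with
            | some a =>
              obtain ⟨pre, suf, hdec, hsa, hpre⟩ := colLoop_some hcol
              have hlen : pre.length < (c :: cs).length := by
                rw [hdec]; simp
              have hga : (c :: cs)[pre.length]'hlen = a := by
                simp [hdec]
              have hamem : a ∈ c :: cs := by rw [hdec]; simp
              have halt : pick_id_column_py_alt (c :: cs) = some a := by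
                refine alt_eq_of_min hne (1, (pre.length : Int)) (pre.length : Int) _
                  (hga ▸ mem_enum_of_getElem hlen) ?_ ?_
                · rw [altKey_eq]
                  split_ifs with e0 e1 e2 e3
                  · exact absurd (e0 ▸ hamem) hnm0
                  · exact absurd (e1 ▸ hamem) hnm1
                  · exact absurd (e2 ▸ hamem) hnm2
                  · exact absurd (e3 ▸ hamem) hnm3
                  · rfl
                · intro q hq
                  obtain ⟨j, hj, rfl⟩ := mem_enum_shape hq
                  rw [altKey_eq]
                  split_ifs with e0 e1 e2 e3 e4
                  · exact absurd (e0 ▸ List.getElem_mem hj) hnm0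
                  · exact absurd (e1 ▸ List.getElem_mem hj) hnm1
                  · exact absurd (e2 ▸ List.getElem_mem hj) hnm2
                  · exact absurd (e3 ▸ List.getElem_mem hj) hnm3
                  · by_cases hj2 : j < pre.length
                    · exfalso
                      have hjpre : (c :: cs)[j]'hj = pre[j]'hj2 := by
                        have h1 : (c :: cs)[j]? = pre[j]? := by
                          rw [hdec, List.getElem?_append_left hj2]
                        rw [List.getElem?_eq_getElem hj, List.getElem?_eq_getElem hj2] at h1
                        exact Option.some.inj h1
                      exact absurd (hjpre ▸ e4) (by simp [hpre pre[j] (List.getElem_mem hj2)])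
                    · simp only [keyLt]
                      simp
                      omega
                  · simp [keyLt]
              rw [halt]
              simp [pick_id_column_py, pickCandLoop, hn0, hn1, hn2, hn3, hcol]
            | none =>
              have hnos := colLoop_none hcol
              have halt : pick_id_column_py_alt (c :: cs) = some c := by
                have h0lt : 0 < (c :: cs).length := by simp
                refine alt_eq_of_min hne (2, 0) 0 _ (mem_enum_of_getElem h0lt) ?_ ?_
                · rw [altKey_eq]
                  split_ifs with e0 e1 e2 e3 e4
                  · exact absurd (e0 ▸ List.getElem_mem h0lt) hnm0
                  · exact absurd (e1 ▸ List.getElem_mem h0lt) hnm1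
                  · exact absurd (e2 ▸ List.getElem_mem h0lt) hnm2
                  · exact absurd (e3 ▸ List.getElem_mem h0lt) hnm3
                  · exact absurd e4 (by simp [hnos c (by simp)])
                  · rfl
                · intro q hq
                  obtain ⟨j, hj, rfl⟩ := mem_enum_shape hq
                  rw [altKey_eq]
                  split_ifs with e0 e1 e2 e3 e4
                  · exact absurd (e0 ▸ List.getElem_mem hj) hnm0
                  · exact absurd (e1 ▸ List.getElem_mem hj) hnm1
                  · exact absurd (e2 ▸ List.getElem_mem hj) hnm2
                  · exact absurd (e3 ▸ List.getElem_mem hj) hnm3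
                  · exact absurd e4 (by simp [hnos _ (List.getElem_mem hj)])
                  · simp [keyLt]
              rw [halt]
              simp [pick_id_column_py, pickCandLoop, hn0, hn1, hn2, hn3, hcol,
                PySem.List.pyGet?, PySem.List.pyIdx?]

-- ===== VERDICT (by name: the statement is the Claim_ definition above) =====
theorem pick_id_column_py_spec : Claim_equal_pick_id_column_py := by
  intro columns _
  unfold Spec_pick_id_column_py
  exact main_eq columns
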